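-- pv_equiv track=rewrite | github.com/Turbofan3360/ESP32_micropython_neom8_gps | gps_driver.py | _ubx_checksum
-- ===== SOURCE A (Python) =====
-- def _ubx_checksum(ubx_packet):
--     ck_a = ck_b = 0
--
--     for byte in ubx_packet:
--         ck_a += byte
--         ck_b += ck_a
--
--     ck_a &= 0xFF
--     ck_b &= 0xFF
--
--     return ck_a, ck_b
-- ===== SOURCE B (Python) =====
-- def _ubx_checksum(ubx_packet):
--     data = list(ubx_packet)
--     n = len(data)
--     ck_a = sum(data)
--     ck_b = sum((n - i) * b for i, b in enumerate(data))
--     return ck_a & 0xFF, ck_b & 0xFF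
-- ===== Notes on version B (the rewrite author's own statement) =====
-- stated objective: alternative
-- what changed: Replaces the chained running-total loop (ck_b accumulating prefix sums of ck_a) by two independent closed-form sums: ck_a = sum(data) and ck_b = the weighted sum of (n - i) * byte over enumerate(data).
import Mathlib
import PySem

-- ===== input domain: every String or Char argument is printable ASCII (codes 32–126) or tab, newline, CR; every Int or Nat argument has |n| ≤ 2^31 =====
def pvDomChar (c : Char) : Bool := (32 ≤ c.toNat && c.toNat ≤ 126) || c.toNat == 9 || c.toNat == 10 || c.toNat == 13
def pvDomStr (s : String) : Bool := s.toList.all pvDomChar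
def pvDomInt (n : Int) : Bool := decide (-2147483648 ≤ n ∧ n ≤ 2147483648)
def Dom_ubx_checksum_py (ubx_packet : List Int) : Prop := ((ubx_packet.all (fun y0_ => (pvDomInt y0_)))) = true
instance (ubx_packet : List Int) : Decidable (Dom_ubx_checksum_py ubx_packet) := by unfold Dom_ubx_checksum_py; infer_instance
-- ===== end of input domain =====

-- ===== PORT A =====
-- B computes the two checksum bytes as independent closed-form sums instead of A's chained running totals (objective: alternative).
def ubx_checksum_py (ubx_packet : List Int) : Int × Int :=
  let s := ubx_packet.foldl (fun (st : Int × Int) byte => (st.1 + byte, st.2 + (st.1 + byte))) (0, 0)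
  (PySem.Int.band s.1 255, PySem.Int.band s.2 255)

-- ===== PORT B =====
def ubx_checksum_py_alt (ubx_packet : List Int) : Int × Int :=
  let data := ubx_packet
  let n : Int := data.length
  let ck_a := data.sum
  let ck_b := ((PySem.List.enumerate data 0).map (fun p => (n - p.1) * p.2)).sum
  (PySem.Int.band ck_a 255, PySem.Int.band ck_b 255)

-- ===== PRECONDITION & SPEC =====
def Spec_ubx_checksum_py (ubx_packet : List Int) (out : Int × Int) : Prop := out = ubx_checksum_py_alt ubx_packet
instance (ubx_packet : List Int) (out : Int × Int) : Decidable (Spec_ubx_checksum_py ubx_packet out) := by unfold Spec_ubx_checksum_py; infer_instance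

-- ===== CLAIM (what is proved, stated in full; the proofs are below) =====
def Claim_equal_ubx_checksum_py : Prop := ∀ (ubx_packet : List Int), Dom_ubx_checksum_py ubx_packet → Spec_ubx_checksum_py ubx_packet (ubx_checksum_py ubx_packet)

-- ===== LEMMAS AND PROOFS =====
theorem pv_enum_shift (xs : List Int) (s : Int) (f : Int → Int → Int) :
    ((PySem.List.enumerate xs (s+1)).map (fun p => f p.1 p.2)).sum
      = ((PySem.List.enumerate xs s).map (fun p => f (p.1+1) p.2)).sum := by
  induction xs generalizing s with
  | nil => simp [PySem.List.enumerate_nil]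
  | cons x xs ih => simp [PySem.List.enumerate_cons, ih]

theorem pv_fold_closed (xs : List Int) (a b : Int) :
    xs.foldl (fun (st : Int × Int) byte => (st.1 + byte, st.2 + (st.1 + byte))) (a, b)
      = (a + xs.sum,
         b + (xs.length : Int) * a
           + ((PySem.List.enumerate xs 0).map (fun p => ((xs.length : Int) - p.1) * p.2)).sum) := by
  induction xs generalizing a b with
  | nil => simp
  | cons x xs ih =>
    simp only [List.foldl_cons, ih, List.sum_cons, List.length_cons,
      PySem.List.enumerate_cons, List.map_cons]
    refine Prod.ext (by push_cast; ring) ?_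
    have h := pv_enum_shift xs 0 (fun i v => ((xs.length : Int) + 1 - i) * v)
    simp only [zero_add] at h
    push_cast
    rw [h]
    have : ((PySem.List.enumerate xs 0).map (fun p => ((xs.length : Int) + 1 - (p.1 + 1)) * p.2))
        = ((PySem.List.enumerate xs 0).map (fun p => ((xs.length : Int) - p.1) * p.2)) := by
      apply List.map_congr_left; intro p _; ring_nf
    rw [this]; ring

-- ===== VERDICT (by name: the statement is the Claim_ definition above) =====
theorem ubx_checksum_py_spec : Claim_equal_ubx_checksum_py := by
  intro xs _
  unfold Spec_ubx_checksum_py ubx_checksum_py ubx_checksum_py_alt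
  simp only [pv_fold_closed, zero_add, mul_zero, add_zero]
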